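-- pv_equiv track=rewrite | github.com/Bigsby/aoc | 2016/day_11/py/run.py | isMoveValid
-- ===== SOURCE A (Python) =====
-- from typing import Dict, Iterable, List, Tuple
--
-- Floor = List[int]
--
-- Elevator = Tuple[int,int]
--
-- EMPTY_SLOT = 0
--
-- def isGroupValid(group: Iterable[int]) -> bool:
--     testGroup = list(group)
--     generators = [ part for part in group if part > 0 ]
--     for generator in generators:
--         if -generator in testGroup:
--             testGroup.remove(-generator)
--             testGroup.remove(generator)
--     if not testGroup:
--         return True
--     return any(map(lambda part: part > 0, testGroup)) ^ any(map(lambda part: part < 0, testGroup))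
--
-- def isMoveValid(currentFloor: Floor, nextFloor: Floor, elevator: Elevator) -> bool:
--     currentTestFloor = list(currentFloor)
--     for part in elevator:
--         if part in currentTestFloor:
--             currentTestFloor.remove(part)
--     nextTestFloor = list(nextFloor)
--     for part in elevator:
--         if part != EMPTY_SLOT:
--             nextTestFloor.append(part)
--
--     return isGroupValid(currentTestFloor) and  isGroupValid(nextTestFloor)
-- ===== SOURCE B (Python) =====
-- # B: count-based checker -- never materializes the adjusted floors; compares per-element
-- # generator/chip counts directly. Objective: simpler/alternative decomposition.
--
-- def _groupValidByCount(cnt, candidates):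
--     hasGen = any(v > 0 and cnt(v) > cnt(-v) for v in candidates)
--     hasChip = any(v < 0 and cnt(v) > cnt(-v) for v in candidates)
--     empty = cnt(0) == 0 and not hasGen and not hasChip
--     return empty or (hasGen != hasChip)
--
-- def isMoveValid(currentFloor, nextFloor, elevator):
--     e = list(elevator)
--     def curCount(v):
--         c = currentFloor.count(v)
--         return c - min(c, e.count(v))
--     def nxtCount(v):
--         return nextFloor.count(v) + (e.count(v) if v != 0 else 0)
--     return (_groupValidByCount(curCount, currentFloor + e)
--             and _groupValidByCount(nxtCount, nextFloor + e))
-- ===== Notes on version B (the rewrite author's own statement) =====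
-- stated objective: alternative
-- what changed: A cancels generator/chip pairs by repeatedly removing elements from copied lists and then re-scans the leftovers; B never materializes adjusted floors: it derives per-value occurrence counts (floor count adjusted by the elevator's removals/additions) and decides validity by comparing count(v) with count(-v) directly.
import Mathlib
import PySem

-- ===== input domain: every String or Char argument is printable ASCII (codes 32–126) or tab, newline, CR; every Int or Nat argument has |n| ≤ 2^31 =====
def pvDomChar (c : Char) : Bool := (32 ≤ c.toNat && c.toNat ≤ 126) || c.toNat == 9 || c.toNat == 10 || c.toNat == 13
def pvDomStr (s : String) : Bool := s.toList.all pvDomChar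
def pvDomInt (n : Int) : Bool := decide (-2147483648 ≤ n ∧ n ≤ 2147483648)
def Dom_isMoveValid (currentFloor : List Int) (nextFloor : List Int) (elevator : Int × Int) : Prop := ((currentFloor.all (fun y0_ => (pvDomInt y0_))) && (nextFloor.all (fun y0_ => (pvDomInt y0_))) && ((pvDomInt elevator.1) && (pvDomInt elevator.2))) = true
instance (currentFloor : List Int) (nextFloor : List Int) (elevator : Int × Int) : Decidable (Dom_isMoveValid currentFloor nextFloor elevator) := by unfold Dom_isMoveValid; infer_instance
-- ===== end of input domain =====

-- B replaces A's pairing-removal loops (list copies + repeated remove/in scans) by direct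
-- per-element count comparisons, never materializing the adjusted floors; objective:
-- alternative decomposition of the same cost.

-- ===== PORT A =====
-- the body of 'for generator in generators: if -generator in testGroup: remove both'
-- (remove? is always 'some' when taken: membership of -generator is checked, and the matching
--  generator is still present by counting; .getD only totalizes)
def cancelLoop (gens : List Int) (tg : List Int) : List Int :=
  gens.foldl (fun tg generator =>
    if tg.contains (-generator) then
      let tg1 := (PySem.List.remove? tg (-generator)).getD tg
      (PySem.List.remove? tg1 generator).getD tg1
    else tg) tg

def isGroupValid (group : List Int) : Bool :=
  let generators := group.filter (fun part => decide (part > 0))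
  let testGroup := cancelLoop generators group
  if testGroup.isEmpty then true
  else (testGroup.any fun part => decide (part > 0)) != (testGroup.any fun part => decide (part < 0))

-- 'if part in floor: floor.remove(part)'
def removeIfPresent (floor : List Int) (part : Int) : List Int :=
  if floor.contains part then (PySem.List.remove? floor part).getD floor else floor

def isMoveValid (currentFloor : List Int) (nextFloor : List Int) (elevator : Int × Int) : Bool :=
  let currentTestFloor := [elevator.1, elevator.2].foldl removeIfPresent currentFloor
  let nextTestFloor := [elevator.1, elevator.2].foldl
    (fun floor part => if part != 0 then floor ++ [part] else floor) nextFloor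
  isGroupValid currentTestFloor && isGroupValid nextTestFloor

-- ===== PORT B =====
def groupValidByCount (cnt : Int → Nat) (candidates : List Int) : Bool :=
  let hasGen := candidates.any fun v => decide (v > 0) && decide (cnt v > cnt (-v))
  let hasChip := candidates.any fun v => decide (v < 0) && decide (cnt v > cnt (-v))
  let empty := decide (cnt 0 = 0) && !hasGen && !hasChip
  empty || (hasGen != hasChip)

def isMoveValid_alt (currentFloor : List Int) (nextFloor : List Int) (elevator : Int × Int) : Bool :=
  let e := [elevator.1, elevator.2]
  let curCount : Int → Nat := fun v =>
    let c := PySem.List.count currentFloor v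
    c - min c (PySem.List.count e v)
  let nxtCount : Int → Nat := fun v =>
    PySem.List.count nextFloor v + (if v ≠ 0 then PySem.List.count e v else 0)
  groupValidByCount curCount (currentFloor ++ e) && groupValidByCount nxtCount (nextFloor ++ e)

-- ===== PRECONDITION & SPEC =====
def Spec_isMoveValid (currentFloor : List Int) (nextFloor : List Int) (elevator : Int × Int) (out : Bool) : Prop := out = isMoveValid_alt currentFloor nextFloor elevator
instance (currentFloor : List Int) (nextFloor : List Int) (elevator : Int × Int) (out : Bool) : Decidable (Spec_isMoveValid currentFloor nextFloor elevator out) := by unfold Spec_isMoveValid; infer_instance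

-- ===== CLAIM (what is proved, stated in full; the proofs are below) =====
def Claim_equal_isMoveValid : Prop := ∀ (currentFloor : List Int) (nextFloor : List Int) (elevator : Int × Int), Dom_isMoveValid currentFloor nextFloor elevator → Spec_isMoveValid currentFloor nextFloor elevator (isMoveValid currentFloor nextFloor elevator)

-- ===== LEMMAS AND PROOFS =====

lemma count_removeIfPresent (f : List Int) (p v : Int) :
    List.count v (removeIfPresent f p)
      = List.count v f - (if p = v ∧ 0 < List.count v f then 1 else 0) := by
  unfold removeIfPresent
  by_cases hm : p ∈ f
  · rw [if_pos (by simpa [List.contains_iff_mem] using hm),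
      PySem.List.remove?_eq_some_erase f p hm, Option.getD_some, List.count_erase]
    by_cases hpv : p = v
    · subst hpv
      have : 0 < List.count p f := List.count_pos_iff.mpr hm
      simp [this]
    · simp [hpv]
  · rw [if_neg (by simp [hm])]
    by_cases hpv : p = v
    · subst hpv
      simp [List.count_eq_zero.mpr hm]
    · simp [hpv]

lemma count_currentTest (cf : List Int) (e1 e2 v : Int) :
    List.count v ([e1, e2].foldl removeIfPresent cf)
      = List.count v cf - min (List.count v cf) (List.count v [e1, e2]) := by
  simp only [List.foldl_cons, List.foldl_nil, count_removeIfPresent, List.count_cons,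
    List.count_nil, beq_iff_eq]
  split_ifs <;> omega

lemma count_nextTest (nf : List Int) (e1 e2 v : Int) :
    List.count v ([e1, e2].foldl (fun floor part => if part != 0 then floor ++ [part] else floor) nf)
      = List.count v nf + (if v ≠ 0 then List.count v [e1, e2] else 0) := by
  simp only [List.foldl_cons, List.foldl_nil, bne_iff_ne]
  by_cases h1 : e1 = 0 <;> by_cases h2 : e2 = 0 <;>
    simp [h1, h2, List.count_append, List.count_cons, List.count_nil, beq_iff_eq] <;>
    (intros; (try split_ifs) <;> omega)

lemma cancel_count (gens : List Int) (tg : List Int)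
    (hpos : ∀ g ∈ gens, 0 < g)
    (h2 : ∀ v : Int, 0 < v → List.count v gens ≤ List.count v tg)
    (h3 : ∀ v : Int, 0 < v → min (List.count v tg) (List.count (-v) tg) ≤ List.count v gens) :
    ∀ v : Int,
      List.count v (cancelLoop gens tg)
        = if v = 0 then List.count 0 tg
          else List.count v tg - min (List.count v tg) (List.count (-v) tg) := by
  induction gens generalizing tg with
  | nil =>
    intro v
    unfold cancelLoop
    simp only [List.foldl_nil]
    by_cases hv : v = 0
    · simp [hv]
    · rw [if_neg hv]
      rcases lt_trichotomy v 0 with h | h | h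
      · have h3' := h3 (-v) (by omega)
        simp only [neg_neg, List.count_nil] at h3'
        omega
      · exact absurd h hv
      · have h3' := h3 v h
        simp only [List.count_nil] at h3'
        omega
  | cons g rest ih =>
    intro v
    have hg : 0 < g := hpos g List.mem_cons_self
    have hga : 0 < List.count g tg := by
      have := h2 g hg
      simp [List.count_cons_self] at this
      omega
    have hgmem : g ∈ tg := List.count_pos_iff.mp hga
    have hcl : cancelLoop (g :: rest) tg
        = cancelLoop rest (if tg.contains (-g) then
            (PySem.List.remove? ((PySem.List.remove? tg (-g)).getD tg) g).getD
              ((PySem.List.remove? tg (-g)).getD tg)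
          else tg) := rfl
    rw [hcl]
    by_cases hb : (-g) ∈ tg
    · have hbc : 0 < List.count (-g) tg := List.count_pos_iff.mpr hb
      rw [if_pos (by simpa [List.contains_iff_mem] using hb),
        PySem.List.remove?_eq_some_erase tg (-g) hb]
      simp only [Option.getD_some]
      have hgin : g ∈ tg.erase (-g) := by
        rw [← List.count_pos_iff, List.count_erase]
        have : (-g == g) = false := by simp; omega
        simp [this]; omega
      rw [PySem.List.remove?_eq_some_erase _ g hgin]
      simp only [Option.getD_some]
      have hcnt : ∀ w : Int, List.count w ((tg.erase (-g)).erase g)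
          = List.count w tg - (if -g = w then 1 else 0) - (if g = w then 1 else 0) := by
        intro w
        rw [List.count_erase, List.count_erase]
        by_cases hw1 : -g = w <;> by_cases hw2 : g = w
        all_goals simp [hw1, hw2]
      have key := ih ((tg.erase (-g)).erase g)
        (fun x hx => hpos x (List.mem_cons_of_mem g hx))
        (by
          intro w hw
          rw [hcnt w]
          have := h2 w hw
          by_cases hwg : w = g
          · subst hwg
            simp [List.count_cons_self] at this
            have : -w ≠ w := by omega
            simp [this]
            omega
          · have hne : (g == w) = false := by simp; omega
            have hne2 : -g ≠ w := by omega
            have hgw : g ≠ w := fun hh => hwg hh.symm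
            simp [List.count_cons, hne] at this
            simp [hne2, hgw]
            omega)
        (by
          intro w hw
          rw [hcnt w, hcnt (-w)]
          have h3w := h3 w hw
          by_cases hwg : w = g
          · subst hwg
            have hne : -w ≠ w := by omega
            have hne2 : w ≠ -w := by omega
            simp [List.count_cons_self, hne, hne2] at h3w ⊢
            omega
          · have hne : (g == w) = false := by simp; omega
            have hc1 : -g ≠ w := by omega
            have hc2 : -g ≠ -w := by omega
            have hc3 : g ≠ -w := by intro hgg; omega
            have hgw : g ≠ w := fun hh => hwg hh.symm
            simp [List.count_cons, hne] at h3w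
            simp [hc1, hc2, hc3, hgw]
            omega)
      rw [key v]
      by_cases hv0 : v = 0
      · subst hv0
        have e1 : -g ≠ (0:Int) := by omega
        have e2 : g ≠ (0:Int) := by omega
        simp [hcnt 0, e1, e2]
      · rw [if_neg hv0, if_neg hv0, hcnt v, hcnt (-v)]
        by_cases hvg : v = g
        · subst hvg
          have e1 : -v ≠ v := by omega
          have e2 : v ≠ -v := by omega
          simp [e1, e2]
          omega
        · by_cases hvng : v = -g
          · subst hvng
            have e1 : g ≠ -g := by omega
            have e2 : -g ≠ g := by omega
            simp [neg_neg, e1, e2]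
            omega
          · have e1 : -g ≠ v := by intro hh; apply hvng; omega
            have e2 : g ≠ v := fun hh => hvg hh.symm
            have e3 : -g ≠ -v := by intro hh; apply hvg; omega
            have e4 : g ≠ -v := by intro hh; apply hvng; omega
            simp [e1, e2, e3, e4]
    · rw [if_neg (by simp [hb])]
      have hbz : List.count (-g) tg = 0 := List.count_eq_zero.mpr hb
      exact ih tg
        (fun x hx => hpos x (List.mem_cons_of_mem g hx))
        (by
          intro w hw
          have := h2 w hw
          simp [List.count_cons] at this
          omega)
        (by
          intro w hw
          have h3w := h3 w hw
          by_cases hwg : w = g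
          · subst hwg
            simp [hbz]
          · have hne : (g == w) = false := by simp; omega
            simp [List.count_cons, hne] at h3w
            omega)
        v

lemma groupValid_eq (G : List Int) (cnt : Int → Nat) (cands : List Int)
    (hc : ∀ v, cnt v = List.count v G)
    (hscope : ∀ v : Int, 0 < List.count v G → v ∈ cands) :
    isGroupValid G = groupValidByCount cnt cands := by
  have hT : ∀ v : Int,
      List.count v (cancelLoop (G.filter fun part => decide (part > 0)) G)
        = if v = 0 then List.count 0 G
          else List.count v G - min (List.count v G) (List.count (-v) G) := by
    apply cancel_count
    · intro g hgm
      have := List.mem_filter.mp hgm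
      simpa using this.2
    · intro v hv
      rw [List.count_filter (by simpa using hv)]
    · intro v hv
      rw [List.count_filter (by simpa using hv)]
      exact min_le_left _ _
  unfold isGroupValid groupValidByCount
  simp only []
  set T := cancelLoop (G.filter fun part => decide (part > 0)) G with hTdef
  have hap : (cands.any fun v => decide (v > 0) && decide (cnt v > cnt (-v)))
      = (T.any fun part => decide (part > 0)) := by
    rw [Bool.eq_iff_iff]
    simp only [List.any_eq_true, Bool.and_eq_true, decide_eq_true_eq]
    constructor
    · rintro ⟨v, _, hv, hlt⟩
      rw [hc, hc] at hlt
      have hpos : 0 < List.count v T := by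
        rw [hT v, if_neg (by omega)]; omega
      exact ⟨v, List.count_pos_iff.mp hpos, hv⟩
    · rintro ⟨v, hvT, hv⟩
      have hpos : 0 < List.count v T := List.count_pos_iff.mpr hvT
      rw [hT v, if_neg (by omega)] at hpos
      refine ⟨v, hscope v (by omega), hv, ?_⟩
      rw [hc, hc]; omega
  have han : (cands.any fun v => decide (v < 0) && decide (cnt v > cnt (-v)))
      = (T.any fun part => decide (part < 0)) := by
    rw [Bool.eq_iff_iff]
    simp only [List.any_eq_true, Bool.and_eq_true, decide_eq_true_eq]
    constructor
    · rintro ⟨v, _, hv, hlt⟩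
      rw [hc, hc] at hlt
      have hpos : 0 < List.count v T := by
        rw [hT v, if_neg (by omega)]; omega
      exact ⟨v, List.count_pos_iff.mp hpos, hv⟩
    · rintro ⟨v, hvT, hv⟩
      have hpos : 0 < List.count v T := List.count_pos_iff.mpr hvT
      rw [hT v, if_neg (by omega)] at hpos
      refine ⟨v, hscope v (by omega), hv, ?_⟩
      rw [hc, hc]; omega
  rw [hap, han]
  cases hA : (T.any fun part => decide (part > 0)) <;>
    cases hB : (T.any fun part => decide (part < 0))
  · -- no positives, no negatives: both sides reduce to emptiness vs zero-count
    have hz : T.isEmpty = decide (cnt 0 = 0) := by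
      rw [Bool.eq_iff_iff, List.isEmpty_iff, decide_eq_true_eq, hc 0]
      constructor
      · intro hnil
        have := hT 0
        rw [hnil] at this
        simpa using this.symm
      · intro h0
        cases hTe : T with
        | nil => rfl
        | cons x t =>
          exfalso
          have hxmem : x ∈ T := by rw [hTe]; exact List.mem_cons_self
          have hx0 : x = 0 := by
            have h1 := List.any_eq_false.mp hA x hxmem
            have h2 := List.any_eq_false.mp hB x hxmem
            simp at h1 h2
            omega
          have : 0 < List.count (0 : Int) T := by
            rw [← hx0]
            exact List.count_pos_iff.mpr hxmem
          rw [hT 0] at this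
          simp [h0] at this
    rw [← hz]
    cases hE : T.isEmpty <;> simp
  · -- a negative leftover exists: T nonempty
    obtain ⟨x, hx, _⟩ := List.any_eq_true.mp hB
    have : T.isEmpty = false := by
      rw [Bool.eq_false_iff, Ne, List.isEmpty_iff]
      intro h; rw [h] at hx; simp at hx
    simp [this]
  · obtain ⟨x, hx, _⟩ := List.any_eq_true.mp hA
    have : T.isEmpty = false := by
      rw [Bool.eq_false_iff, Ne, List.isEmpty_iff]
      intro h; rw [h] at hx; simp at hx
    simp [this]
  · obtain ⟨x, hx, _⟩ := List.any_eq_true.mp hA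
    have : T.isEmpty = false := by
      rw [Bool.eq_false_iff, Ne, List.isEmpty_iff]
      intro h; rw [h] at hx; simp at hx
    simp [this]

-- ===== VERDICT (by name: the statement is the Claim_ definition above) =====
theorem isMoveValid_spec : Claim_equal_isMoveValid := by
  intro currentFloor nextFloor elevator _
  unfold Spec_isMoveValid isMoveValid isMoveValid_alt
  simp only []
  have h1 : isGroupValid ([elevator.1, elevator.2].foldl removeIfPresent currentFloor)
      = groupValidByCount
          (fun v => let c := PySem.List.count currentFloor v
            c - min c (PySem.List.count [elevator.1, elevator.2] v))
          (currentFloor ++ [elevator.1, elevator.2]) := by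
    apply groupValid_eq
    · intro v
      simp only [PySem.List.count_eq]
      rw [count_currentTest]
    · intro v hv
      rw [count_currentTest] at hv
      exact List.mem_append_left _ (List.count_pos_iff.mp (by omega))
  have h2 : isGroupValid ([elevator.1, elevator.2].foldl
        (fun floor part => if part != 0 then floor ++ [part] else floor) nextFloor)
      = groupValidByCount
          (fun v => PySem.List.count nextFloor v
            + (if v ≠ 0 then PySem.List.count [elevator.1, elevator.2] v else 0))
          (nextFloor ++ [elevator.1, elevator.2]) := by
    apply groupValid_eq
    · intro v
      simp only [PySem.List.count_eq]
      rw [count_nextTest]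
    · intro v hv
      rw [count_nextTest] at hv
      rcases Nat.lt_or_ge 0 (List.count v nextFloor) with h | h
      · exact List.mem_append_left _ (List.count_pos_iff.mp h)
      · refine List.mem_append_right _ (List.count_pos_iff.mp ?_)
        by_cases hv0 : v = 0
        · rw [if_neg (by simp [hv0])] at hv
          omega
        · rw [if_pos hv0] at hv
          omega
  rw [h1, h2]
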